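-- pv_equiv track=rewrite | github.com/Anesti101/storf-reporter-enhancement | Code/Using now/Overlap01.py | con_storf_contains_storf
-- ===== SOURCE A (Python) =====
-- from typing import List, Tuple, Dict
--
-- def check_overlap(range1: Tuple[int, int], range2: Tuple[int, int]) -> bool:
--     return max(range1[0], range2[0]) <= min(range1[1], range2[1])
--
-- def con_storf_contains_storf(storfs: Dict[str, List[Tuple[str, int, int]]],
--                               constorfs: Dict[str, List[Tuple[str, int, int]]]) -> Dict[str, List[str]]:
--     contained = {}
--     for seq_id in constorfs:
--         if seq_id not in storfs:
--             continue
--         for con_full, c_start, c_end in constorfs[seq_id]: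
--             for storf_full, s_start, s_end in storfs[seq_id]:
--                 if check_overlap((c_start, c_end), (s_start, s_end)):
--                     if con_full not in contained:
--                         contained[con_full] = []
--                     contained[con_full].append(storf_full)
--     return contained
-- ===== SOURCE B (Python) =====
-- from typing import List, Tuple, Dict
--
-- def con_storf_contains_storf(storfs: Dict[str, List[Tuple[str, int, int]]],
--                               constorfs: Dict[str, List[Tuple[str, int, int]]]) -> Dict[str, List[str]]:
--     # Sort storfs once by start per sequence, scan each constorf against candidates with
--     # early exit once starts pass c_end, then restore original order by index.
--     contained = {}
--     for seq_id, cons in constorfs.items():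
--         ss = storfs.get(seq_id)
--         if ss is None:
--             continue
--         indexed = sorted(enumerate(ss), key=lambda t: t[1][1])
--         for con_full, c_start, c_end in cons:
--             if c_end < c_start:
--                 continue
--             hits = []
--             for idx, (storf_full, s_start, s_end) in indexed:
--                 if c_end < s_start:
--                     break
--                 if s_start <= s_end and c_start <= s_end:
--                     hits.append((idx, storf_full))
--             if hits:
--                 hits.sort(key=lambda t: t[0])
--                 contained.setdefault(con_full, []).extend(n for _, n in hits)
--     return contained
-- ===== Notes on version B (the rewrite author's own statement) =====
-- stated objective: alternative
-- what changed: Per sequence B sorts the storfs once by start with their original indices, scans each constorf's candidates in start order with an early exit once starts exceed c_end, and re-sorts the hits by index to reproduce A's output order, instead of A's full nested scan of every (constorf, storf) pair.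
import Mathlib
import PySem

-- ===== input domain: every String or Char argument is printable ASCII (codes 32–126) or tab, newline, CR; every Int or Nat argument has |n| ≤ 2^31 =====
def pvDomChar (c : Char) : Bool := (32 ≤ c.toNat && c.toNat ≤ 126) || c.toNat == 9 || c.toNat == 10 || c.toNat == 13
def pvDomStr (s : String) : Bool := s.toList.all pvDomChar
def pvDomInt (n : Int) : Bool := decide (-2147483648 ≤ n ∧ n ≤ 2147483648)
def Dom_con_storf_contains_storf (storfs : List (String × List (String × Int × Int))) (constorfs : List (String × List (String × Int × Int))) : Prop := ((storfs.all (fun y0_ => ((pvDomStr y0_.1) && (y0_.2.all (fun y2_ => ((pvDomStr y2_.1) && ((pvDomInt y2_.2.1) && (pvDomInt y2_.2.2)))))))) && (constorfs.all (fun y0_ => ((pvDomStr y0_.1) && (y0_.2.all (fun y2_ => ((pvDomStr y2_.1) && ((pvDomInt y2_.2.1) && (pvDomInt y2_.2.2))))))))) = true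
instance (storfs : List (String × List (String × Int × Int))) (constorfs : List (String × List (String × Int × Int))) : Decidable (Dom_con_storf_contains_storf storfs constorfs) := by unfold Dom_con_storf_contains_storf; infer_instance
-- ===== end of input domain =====

-- B replaces A's per-sequence full nested scan by a start-sorted index with early exit past
-- c_end, re-sorting hits by original index to restore A's order (alternative algorithm; same results).


-- ===== PORT A =====
def checkOverlap (range1 range2 : Int × Int) : Bool :=
  decide (max range1.1 range2.1 ≤ min range1.2 range2.2)

def con_storf_contains_storf (storfs : List (String × List (String × Int × Int))) (constorfs : List (String × List (String × Int × Int))) : List (String × List String) :=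
  (constorfs.foldl
    (fun (contained : PySem.Dict String (List String)) seqEntry =>
      if (PySem.Dict.mk storfs).contains seqEntry.1 = false then contained
      else
        (seqEntry.2).foldl
          (fun contained con =>
            ((PySem.Dict.mk storfs).getD seqEntry.1 []).foldl
              (fun contained st =>
                if checkOverlap (con.2.1, con.2.2) (st.2.1, st.2.2) then
                  let d1 := if contained.contains con.1 = false then contained.insert con.1 [] else contained
                  d1.insert con.1 (d1.getD con.1 [] ++ [st.1])
                else contained)
              contained)
          contained)
    PySem.Dict.empty).items

-- ===== PORT B =====
-- the 'for … break' scan over the start-sorted index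
def collectHits (cStart cEnd : Int) : List (Int × (String × Int × Int)) → List (Int × String)
  | [] => []
  | (idx, st) :: rest =>
    if cEnd < st.2.1 then []
    else if st.2.1 ≤ st.2.2 ∧ cStart ≤ st.2.2 then (idx, st.1) :: collectHits cStart cEnd rest
    else collectHits cStart cEnd rest

def con_storf_contains_storf_alt (storfs : List (String × List (String × Int × Int))) (constorfs : List (String × List (String × Int × Int))) : List (String × List String) :=
  (constorfs.foldl
    (fun (contained : PySem.Dict String (List String)) seqEntry =>
      match (PySem.Dict.mk storfs).get? seqEntry.1 with
      | none => contained
      | some ss =>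
        let indexed := PySem.List.sorted (PySem.List.enumerate ss) (fun t => t.2.2.1) false
        (seqEntry.2).foldl
          (fun contained con =>
            if con.2.2 < con.2.1 then contained
            else
              let hits := collectHits con.2.1 con.2.2 indexed
              if hits = [] then contained
              else
                let shits := PySem.List.sorted hits (fun t => t.1) false
                let d1 := contained.setdefault con.1 []
                d1.insert con.1 (d1.getD con.1 [] ++ shits.map (fun t => t.2)))
          contained)
    PySem.Dict.empty).items

-- ===== PRECONDITION & SPEC =====
def Spec_con_storf_contains_storf (storfs : List (String × List (String × Int × Int))) (constorfs : List (String × List (String × Int × Int))) (out : List (String × List String)) : Prop := out = con_storf_contains_storf_alt storfs constorfs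
instance (storfs : List (String × List (String × Int × Int))) (constorfs : List (String × List (String × Int × Int))) (out : List (String × List String)) : Decidable (Spec_con_storf_contains_storf storfs constorfs out) := by unfold Spec_con_storf_contains_storf; infer_instance

-- ===== CLAIM (what is proved, stated in full; the proofs are below) =====
def Claim_equal_con_storf_contains_storf : Prop := ∀ (storfs : List (String × List (String × Int × Int))) (constorfs : List (String × List (String × Int × Int))), Dom_con_storf_contains_storf storfs constorfs → Spec_con_storf_contains_storf storfs constorfs (con_storf_contains_storf storfs constorfs)

-- ===== LEMMAS AND PROOFS =====

theorem insert_insert_self {κ ν : Type} [BEq κ] [LawfulBEq κ] (d : PySem.Dict κ ν) (k : κ) (v w : ν) :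
    (d.insert k v).insert k w = d.insert k w := by
  apply PySem.Dict.ext
  rw [PySem.Dict.items_insert, PySem.Dict.items_insert, PySem.Dict.items_insert]
  simp only [PySem.Dict.contains_insert_self]
  by_cases h : d.contains k
  · simp only [h, if_pos, List.map_map, Function.comp_def]
    apply List.map_congr_left
    intro p _
    by_cases hp : p.1 == k <;> simp [hp]
  · simp only [h, if_neg, Bool.false_eq_true, not_false_iff, List.map_append]
    have : List.map (fun p => if (p.1 == k) = true then (k, w) else p) d.items = d.items := by
      conv_rhs => rw [← List.map_id d.items]
      apply List.map_congr_left
      intro p hp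
      have hne : p.1 ≠ k := by
        intro he
        have hc : d.contains k = true := by
          rw [PySem.Dict.contains_iff_mem_keys]
          exact he ▸ PySem.Dict.mem_keys_of_mem_items d hp
        exact h hc
      simp [hne]
    simp [this]

def appendAt (d : PySem.Dict String (List String)) (k : String) (names : List String) : PySem.Dict String (List String) :=
  (d.setdefault k []).insert k ((d.setdefault k []).getD k [] ++ names)

theorem appendAt_appendAt (d : PySem.Dict String (List String)) (k : String) (xs ys : List String) :
    appendAt (appendAt d k xs) k ys = appendAt d k (xs ++ ys) := by
  unfold appendAt
  have hc : ((d.setdefault k []).insert k ((d.setdefault k []).getD k [] ++ xs)).contains k := PySem.Dict.contains_insert_self _ _ _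
  rw [PySem.Dict.setdefault_of_contains _ _ hc, PySem.Dict.getD_insert_self, insert_insert_self, List.append_assoc]

theorem foldl_appendAt (k : String) (names : List String) (d : PySem.Dict String (List String)) :
    names.foldl (fun d n => appendAt d k [n]) d = if names = [] then d else appendAt d k names := by
  induction names generalizing d with
  | nil => simp
  | cons n ns ih =>
    simp only [List.foldl_cons, ih, List.cons_ne_nil]
    by_cases h : ns = []
    · simp [h]
    · simp only [h, appendAt_appendAt]
      rfl

def predH (cStart cEnd : Int) (t : Int × (String × Int × Int)) : Bool :=
  decide (t.2.2.1 ≤ cEnd) && decide (t.2.2.1 ≤ t.2.2.2) && decide (cStart ≤ t.2.2.2)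

theorem collectHits_eq_filter (cStart cEnd : Int) (l : List (Int × (String × Int × Int)))
    (h : l.Pairwise (fun a b => a.2.2.1 ≤ b.2.2.1)) :
    collectHits cStart cEnd l = (l.filter (predH cStart cEnd)).map (fun t => (t.1, t.2.1)) := by
  induction l with
  | nil => rfl
  | cons t rest ih =>
    obtain ⟨idx, st⟩ := t
    rw [List.pairwise_cons] at h
    by_cases hb : cEnd < st.2.1
    · have hrest : rest.filter (predH cStart cEnd) = [] := by
        rw [List.filter_eq_nil_iff]
        intro u hu
        have h1 : st.2.1 ≤ u.2.2.1 := h.1 u hu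
        simp only [predH, Bool.and_eq_true, decide_eq_true_eq]
        omega
      simp [collectHits, hb, predH, hrest, show ¬ st.2.1 ≤ cEnd by omega]
    · by_cases hp : st.2.1 ≤ st.2.2 ∧ cStart ≤ st.2.2
      · simp [collectHits, hb, hp, predH, show st.2.1 ≤ cEnd by omega, ih h.2]
      · have : predH cStart cEnd (idx, st) = false := by
          simp only [predH, Bool.and_eq_true, decide_eq_true_eq, Bool.eq_false_iff, ne_eq]
          omega
        simp [collectHits, hb, hp, this, ih h.2]

theorem filter_enumerate_map {β : Type} (q : (String × Int × Int) → Bool) (f : (String × Int × Int) → β)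
    (ss : List (String × Int × Int)) (s0 : Int) :
    ((PySem.List.enumerate ss s0).filter (fun t => q t.2)).map (fun t => f t.2) = (ss.filter q).map f := by
  induction ss generalizing s0 with
  | nil => rfl
  | cons x xs ih =>
    rw [PySem.List.enumerate_cons]
    by_cases hq : q x <;> simp [hq, ih]

-- A's overlap test equals the scan test when cStart ≤ cEnd
theorem pred_eq_predH (cStart cEnd : Int) (hce : cStart ≤ cEnd) (st : String × Int × Int) :
    checkOverlap (cStart, cEnd) (st.2.1, st.2.2) = predH cStart cEnd ((0 : Int), st) := by
  simp only [checkOverlap, predH, ← Bool.decide_and]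
  apply decide_eq_decide.mpr
  simp only [max_le_iff, le_min_iff]
  omega

theorem names_eq (cStart cEnd : Int) (hce : cStart ≤ cEnd) (ss : List (String × Int × Int)) :
    (PySem.List.sorted (collectHits cStart cEnd
        (PySem.List.sorted (PySem.List.enumerate ss) (fun t => t.2.2.1) false)) (fun t => t.1) false).map (fun t => t.2)
      = (ss.filter (fun st => checkOverlap (cStart, cEnd) (st.2.1, st.2.2))).map (fun st => st.1) := by
  set indexed := PySem.List.sorted (PySem.List.enumerate ss) (fun t => t.2.2.1) false with hidx
  have hpw : indexed.Pairwise (fun a b => a.2.2.1 ≤ b.2.2.1) :=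
    PySem.List.sorted_pairwise (PySem.List.enumerate ss) (fun t => t.2.2.1)
  rw [collectHits_eq_filter _ _ _ hpw]
  have hperm : (((PySem.List.enumerate ss).filter (predH cStart cEnd)).map (fun t => (t.1, t.2.1))).Perm
      ((indexed.filter (predH cStart cEnd)).map (fun t => (t.1, t.2.1))) :=
    (((PySem.List.sorted_perm (PySem.List.enumerate ss) (fun t => t.2.2.1) false).symm).filter _).map _
  have hpwlt : (((PySem.List.enumerate ss).filter (predH cStart cEnd)).map (fun t => (t.1, t.2.1))).Pairwise
      (fun a b => a.1 < b.1) := by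
    rw [List.pairwise_map]
    exact (PySem.List.pairwise_lt_enumerate ss 0).filter _
  rw [PySem.List.sorted_eq_of_perm_of_pairwise_lt _ _ _ hperm hpwlt]
  rw [List.map_map]
  have : ((PySem.List.enumerate ss 0).filter (predH cStart cEnd)).map ((fun t : Int × String => t.2) ∘ (fun t => (t.1, t.2.1)))
      = ((PySem.List.enumerate ss 0).filter (fun t => predH cStart cEnd ((0:Int), t.2))).map (fun t => t.2.1) := by
    rfl
  rw [this, filter_enumerate_map (fun st => predH cStart cEnd ((0:Int), st)) (fun st : String × Int × Int => st.1) ss 0]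
  congr 1
  apply List.filter_congr
  intro st _
  exact (pred_eq_predH cStart cEnd hce st).symm

theorem hits_nil_iff (cStart cEnd : Int) (hce : cStart ≤ cEnd) (ss : List (String × Int × Int)) :
    collectHits cStart cEnd (PySem.List.sorted (PySem.List.enumerate ss) (fun t => t.2.2.1) false) = []
      ↔ ss.filter (fun st => checkOverlap (cStart, cEnd) (st.2.1, st.2.2)) = [] := by
  have h := names_eq cStart cEnd hce ss
  constructor
  · intro h0
    rw [h0] at h
    simp only [PySem.List.sorted] at h
    exact (List.map_eq_nil_iff.mp h.symm)
  · intro h0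
    rw [h0] at h
    simp only [List.map_nil, List.map_eq_nil_iff, PySem.List.sorted_eq_nil_iff] at h
    exact h

theorem stepA_eq (d : PySem.Dict String (List String)) (k : String) :
    (if d.contains k = false then d.insert k [] else d) = d.setdefault k [] := by
  by_cases h : d.contains k
  · simp [h, PySem.Dict.setdefault_of_contains _ _ h]
  · simp only [Bool.not_eq_true] at h
    simp [h, PySem.Dict.setdefault_of_not_contains _ _ h]

theorem conStep_eq (ss : List (String × Int × Int)) (d : PySem.Dict String (List String)) (cf : String) (cs ce : Int) :
    ss.foldl (fun d st =>
      if checkOverlap (cs, ce) (st.2.1, st.2.2) then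
        let d1 := if d.contains cf = false then d.insert cf [] else d
        d1.insert cf (d1.getD cf [] ++ [st.1])
      else d) d
    = (if ce < cs then d
       else
         let hits := collectHits cs ce (PySem.List.sorted (PySem.List.enumerate ss) (fun t => t.2.2.1) false)
         if hits = [] then d
         else
           let shits := PySem.List.sorted hits (fun t => t.1) false
           let d1 := d.setdefault cf []
           d1.insert cf (d1.getD cf [] ++ shits.map (fun t => t.2))) := by
  have hstep : (fun (d : PySem.Dict String (List String)) (st : String × Int × Int) =>
      if checkOverlap (cs, ce) (st.2.1, st.2.2) then
        let d1 := if d.contains cf = false then d.insert cf [] else d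
        d1.insert cf (d1.getD cf [] ++ [st.1])
      else d) = (fun d st => if checkOverlap (cs, ce) (st.2.1, st.2.2) then appendAt d cf [st.1] else d) := by
    funext d st
    by_cases h : checkOverlap (cs, ce) (st.2.1, st.2.2) <;> simp [h, appendAt, stepA_eq]
  rw [hstep, PySem.List.foldl_if_eq_foldl_filter,
    ← List.foldl_map (f := fun st : String × Int × Int => st.1) (g := fun d n => appendAt d cf [n]),
    foldl_appendAt]
  by_cases hce : ce < cs
  · have hnil : ss.filter (fun st => checkOverlap (cs, ce) (st.2.1, st.2.2)) = [] := by
      rw [List.filter_eq_nil_iff]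
      intro st _
      simp only [checkOverlap, max_le_iff, le_min_iff, decide_eq_true_eq, not_and]
      omega
    simp [hnil, hce]
  · have hce' : cs ≤ ce := by omega
    have hn := names_eq cs ce hce' ss
    have hiff := hits_nil_iff cs ce hce' ss
    simp only [if_neg hce]
    by_cases hh : collectHits cs ce (PySem.List.sorted (PySem.List.enumerate ss) (fun t => t.2.2.1) false) = []
    · simp [hh, List.map_eq_nil_iff.mpr (hiff.mp hh)]
    · have : ¬ (ss.filter (fun st => checkOverlap (cs, ce) (st.2.1, st.2.2))).map (fun st => st.1) = [] := by
        intro h0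
        exact hh (hiff.mpr (List.map_eq_nil_iff.mp h0))
      rw [if_neg this, if_neg hh]
      simp only [hn, appendAt]

-- ===== VERDICT (by name: the statement is the Claim_ definition above) =====
theorem con_storf_contains_storf_spec : Claim_equal_con_storf_contains_storf := by
  intro storfs constorfs _
  unfold Spec_con_storf_contains_storf con_storf_contains_storf con_storf_contains_storf_alt
  congr 1
  apply PySem.List.foldl_congr_mem
  intro acc e _
  cases hg : (PySem.Dict.mk storfs).get? e.1 with
  | none =>
    have hc : (PySem.Dict.mk storfs).contains e.1 = false := by
      rw [PySem.Dict.contains_eq_isSome_get?, hg]; rfl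
    simp [hc]
  | some ss =>
    have hc : (PySem.Dict.mk storfs).contains e.1 = true := by
      rw [PySem.Dict.contains_eq_isSome_get?, hg]; rfl
    have hD : (PySem.Dict.mk storfs).getD e.1 [] = ss := by
      rw [PySem.Dict.getD_eq_get?_getD, hg]; rfl
    simp only [hc, hD, Bool.true_eq_false, ite_false]
    apply PySem.List.foldl_congr_mem
    intro d con _
    exact conStep_eq ss d con.1 con.2.1 con.2.2
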